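-- pv_equiv track=rewrite | github.com/siklone/RegProbe | scripts/source_enrichment_scan.py | build_priority_queue
-- ===== SOURCE A (Python) =====
-- from typing import Any, Dict, Iterable, List
--
-- def _priority_sort_key(candidate: Dict[str, Any]) -> tuple:
--     return (
--         -int(candidate.get("enrichment_score", 0)),
--         -int(candidate.get("support_count", 0)),
--         candidate.get("candidate_id") or "",
--     )
--
-- def build_priority_queue(candidates: List[Dict[str, Any]]) -> Dict[str, List[str]]:
--     high_priority_runtime: List[Dict[str, Any]] = []
--     high_priority_windbg: List[Dict[str, Any]] = []
--     low_priority_hold: List[Dict[str, Any]] = []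
--
--     for candidate in candidates:
--         queue_bucket = candidate.get("suggested_queue_bucket")
--         if queue_bucket == "runtime":
--             high_priority_runtime.append(candidate)
--         elif queue_bucket == "windbg":
--             high_priority_windbg.append(candidate)
--         else:
--             low_priority_hold.append(candidate)
--
--     return {
--         "high_priority_runtime": [item["candidate_id"] for item in sorted(high_priority_runtime, key=_priority_sort_key)],
--         "high_priority_windbg": [item["candidate_id"] for item in sorted(high_priority_windbg, key=_priority_sort_key)],
--         "low_priority_hold": [item["candidate_id"] for item in sorted(low_priority_hold, key=_priority_sort_key)],
--     }
-- ===== SOURCE B (Python) =====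
-- from typing import Any, Dict, List
--
-- def build_priority_queue(candidates: List[Dict[str, Any]]) -> Dict[str, List[str]]:
--     # decorate-sort-undecorate: pair each candidate's composite key with its original
--     # index (so plain tuple sort is equivalent to a stable key sort and never compares
--     # the trailing fields), sort once, then read each bucket off the sorted triples.
--     decorated = [
--         ((-int(c.get("enrichment_score", 0)),
--           -int(c.get("support_count", 0)),
--           c.get("candidate_id") or ""),
--          i,
--          c.get("suggested_queue_bucket"),
--          c["candidate_id"])
--         for i, c in enumerate(candidates)
--     ]
--     decorated.sort()
--     return {
--         "high_priority_runtime": [cid for _k, _i, b, cid in decorated if b == "runtime"],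
--         "high_priority_windbg": [cid for _k, _i, b, cid in decorated if b == "windbg"],
--         "low_priority_hold": [cid for _k, _i, b, cid in decorated if b != "runtime" and b != "windbg"],
--     }
-- ===== Notes on version B (the rewrite author's own statement) =====
-- stated objective: alternative
-- what changed: B replaces A's partition-into-three-buckets followed by three separate key-sorts with a decorate-sort-undecorate pass: it builds (key, index, bucket, id) tuples, does one plain tuple sort (the index makes it equivalent to a stable key sort), then reads each bucket's ids off the sorted list with three filters.
import Mathlib
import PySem

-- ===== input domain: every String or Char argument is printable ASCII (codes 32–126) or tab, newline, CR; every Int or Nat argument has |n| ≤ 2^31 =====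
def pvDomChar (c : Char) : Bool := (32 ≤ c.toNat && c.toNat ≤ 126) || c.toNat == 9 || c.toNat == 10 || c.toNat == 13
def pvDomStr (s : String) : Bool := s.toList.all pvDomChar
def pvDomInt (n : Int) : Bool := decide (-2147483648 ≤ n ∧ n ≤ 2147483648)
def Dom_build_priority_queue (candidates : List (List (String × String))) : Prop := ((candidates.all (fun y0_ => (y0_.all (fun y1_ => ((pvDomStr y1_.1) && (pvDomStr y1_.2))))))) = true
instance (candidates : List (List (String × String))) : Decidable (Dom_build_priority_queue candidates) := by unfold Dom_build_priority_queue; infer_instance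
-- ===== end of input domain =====

-- B changes the decomposition to decorate-sort-undecorate: one plain sort of
-- (key, index, bucket, id) tuples, then three filtering passes over the sorted list,
-- instead of A's partition into three buckets followed by three separate key-sorts
-- (objective: alternative, same cost).

-- ===== PORT A =====
-- shared helpers (the dict accesses both Pythons make)

-- candidate.get(k): first-match lookup in the association list
def pvGet (c : List (String × String)) (k : String) : Option String := List.lookup k c

-- int(candidate.get(k, 0)): missing key gives int 0; present value is parsed by int(str).
-- (PySem.Int.ofStr? s).getD 0 is total; Pre_ excludes the inputs where ofStr? is none (Python ValueError).
def pvIntAt (c : List (String × String)) (k : String) : Int :=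
  match pvGet c k with
  | none => 0
  | some s => (PySem.Int.ofStr? s).getD 0

-- candidate.get("candidate_id") or "" (None and "" are both falsy, giving "");
-- also item["candidate_id"] under Pre_ (which demands the key be present there).
def pvCid (c : List (String × String)) : String :=
  match pvGet c "candidate_id" with
  | none => ""
  | some s => s

-- A-side helpers: the two leading components of _priority_sort_key's tuple
def pvK1 (c : List (String × String)) : Int := -(pvIntAt c "enrichment_score")
def pvK2 (c : List (String × String)) : Int := -(pvIntAt c "support_count")

-- Python compares _priority_sort_key's tuples lexicographically; explicit boolean comparison in the
-- style of PySem.List.sorted2 (Lean's order on pairs is pointwise, so a tuple-typed key would be wrong)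
def pvBefore (a b : List (String × String)) : Bool :=
  decide (pvK1 a < pvK1 b) ||
    (!decide (pvK1 b < pvK1 a) &&
      (decide (pvK2 a < pvK2 b) ||
        (!decide (pvK2 b < pvK2 a) && decide (pvCid a < pvCid b))))

-- sorted(xs, key=_priority_sort_key): Python's stable sort, in PySem's foldl/insertBy form
-- (PySem.List.sorted_eq_foldl_insertBy: this IS PySem.List.sorted for the lexicographic triple key)
def pvSorted (xs : List (List (String × String))) : List (List (String × String)) :=
  xs.foldl (fun acc x => PySem.List.insertBy pvBefore x acc) []

-- queue_bucket == "runtime" / == "windbg" (queue_bucket may be None; None == str is False)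
def pvIsRuntime (c : List (String × String)) : Bool := pvGet c "suggested_queue_bucket" == some "runtime"
def pvIsWindbg (c : List (String × String)) : Bool := pvGet c "suggested_queue_bucket" == some "windbg"

def build_priority_queue (candidates : List (List (String × String))) : List (String × List String) :=
  -- the for-loop partitioning into high_priority_runtime / high_priority_windbg / low_priority_hold
  let t := candidates.foldl (fun (acc : List (List (String × String)) × List (List (String × String)) × List (List (String × String))) c =>
      if pvIsRuntime c then (acc.1 ++ [c], acc.2.1, acc.2.2)
      else if pvIsWindbg c then (acc.1, acc.2.1 ++ [c], acc.2.2)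
      else (acc.1, acc.2.1, acc.2.2 ++ [c])) ([], [], [])
  -- the returned dict: each bucket sorted by _priority_sort_key, then candidate_id extracted
  [("high_priority_runtime", (pvSorted t.1).map pvCid),
   ("high_priority_windbg", (pvSorted t.2.1).map pvCid),
   ("low_priority_hold", (pvSorted t.2.2).map pvCid)]

-- ===== PORT B =====
-- B-side helper: the decorated 4-tuple built for candidate c at original position i —
-- the composite sort key (as a plain data triple), the index i, the bucket tag
-- (Option: .get may give None) and candidate_id.
-- Source B's c["candidate_id"] is pvCid under Pre_ (the key is present there).
def pvDecorate (i : Int) (c : List (String × String)) :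
    ((Int × Int × String) × Int × Option String × String) :=
  ((-(pvIntAt c "enrichment_score"), -(pvIntAt c "support_count"), pvCid c),
   i, pvGet c "suggested_queue_bucket", pvCid c)

-- Python's tuple < on the decorated 4-tuples: lexicographic, explicit booleans.
-- The index in slot 2 is unique, so the comparison is decided there at the latest
-- and never reaches the bucket/id slots (which Python could not always compare).
def pvTupleLt (a b : ((Int × Int × String) × Int × Option String × String)) : Bool :=
  decide (a.1.1 < b.1.1) || (a.1.1 == b.1.1 &&
    (decide (a.1.2.1 < b.1.2.1) || (a.1.2.1 == b.1.2.1 &&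
      (decide (a.1.2.2 < b.1.2.2) || (a.1.2.2 == b.1.2.2 &&
        decide (a.2.1 < b.2.1))))))

def build_priority_queue_alt (candidates : List (List (String × String))) : List (String × List String) :=
  -- the decorating comprehension over enumerate(candidates)
  let decorated := (PySem.List.enumerate candidates).map (fun p => pvDecorate p.1 p.2)
  -- decorated.sort(): Python's stable sort under tuple <, in PySem's foldl/insertBy form
  let s := decorated.foldl (fun acc t => PySem.List.insertBy pvTupleLt t acc) []
  -- the three undecorating comprehensions
  [("high_priority_runtime", (s.filter (fun t => t.2.2.1 == some "runtime")).map (fun t => t.2.2.2)),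
   ("high_priority_windbg", (s.filter (fun t => t.2.2.1 == some "windbg")).map (fun t => t.2.2.2)),
   ("low_priority_hold", (s.filter (fun t => !(t.2.2.1 == some "runtime") && !(t.2.2.1 == some "windbg"))).map (fun t => t.2.2.2))]

-- ===== PRECONDITION & SPEC =====
-- Pre_ excludes exactly the inputs where the Python raises: a candidate without a "candidate_id" key
-- (KeyError in the output comprehension) or whose "enrichment_score"/"support_count" value does not
-- parse as int (ValueError in the sort key).
def Pre_build_priority_queue (candidates : List (List (String × String))) : Prop :=
  ∀ c ∈ candidates, (pvGet c "candidate_id").isSome = true ∧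
    (∀ s, pvGet c "enrichment_score" = some s → (PySem.Int.ofStr? s).isSome = true) ∧
    (∀ s, pvGet c "support_count" = some s → (PySem.Int.ofStr? s).isSome = true)
instance (candidates : List (List (String × String))) : Decidable (Pre_build_priority_queue candidates) := by unfold Pre_build_priority_queue; infer_instance

def pvWitness_build_priority_queue : (List (List (String × String))) :=
  [[("candidate_id", "a"), ("enrichment_score", "3"), ("suggested_queue_bucket", "runtime")],
   [("candidate_id", "b"), ("support_count", "2")]]

def Spec_build_priority_queue (candidates : List (List (String × String))) (out : List (String × List String)) : Prop := out = build_priority_queue_alt candidates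
instance (candidates : List (List (String × String))) (out : List (String × List String)) : Decidable (Spec_build_priority_queue candidates out) := by unfold Spec_build_priority_queue; infer_instance

-- ===== CLAIM (what is proved, stated in full; the proofs are below) =====
def Claim_equal_build_priority_queue : Prop := ∀ (candidates : List (List (String × String))), Dom_build_priority_queue candidates → Pre_build_priority_queue candidates → Spec_build_priority_queue candidates (build_priority_queue candidates)

-- ===== LEMMAS AND PROOFS =====

-- the A-side key, as a proof-side value in the linear order Int ×ₗ (Int ×ₗ String)
def pvKeyLex (c : List (String × String)) : Int ×ₗ (Int ×ₗ String) :=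
  toLex (pvK1 c, toLex (pvK2 c, pvCid c))

-- pvBefore is exactly the strict order of pvKeyLex
theorem pv_before_eq : pvBefore = fun a b => decide (pvKeyLex a < pvKeyLex b) := by
  funext a b
  simp only [pvBefore, pvKeyLex, Prod.Lex.toLex_lt_toLex]
  rcases lt_trichotomy (pvK1 a) (pvK1 b) with h1 | h1 | h1
  · simp [h1]
  · rcases lt_trichotomy (pvK2 a) (pvK2 b) with h2 | h2 | h2
    · simp [h1, h2, not_lt_of_gt h2]
    · simp [h1, h2]
    · simp only [h1, not_lt_of_gt h2, h2.ne']
      simp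
      intro h
      exfalso
      omega
  · simp [not_lt_of_gt h1, h1.ne']
    intro h
    exfalso
    omega

-- pvSorted is PySem.List.sorted with that key
theorem pv_sorted_eq (xs : List (List (String × String))) :
    pvSorted xs = PySem.List.sorted xs pvKeyLex false := by
  rw [PySem.List.sorted_eq_foldl_insertBy, pvSorted, pv_before_eq]

-- the decorated tuple's comparison prefix, as a value in the linear order
-- (Int ×ₗ (Int ×ₗ String)) ×ₗ Int (proof-side only)
def pvKeyD (t : (Int × Int × String) × Int × Option String × String) :
    (Int ×ₗ (Int ×ₗ String)) ×ₗ Int :=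
  toLex (toLex (t.1.1, toLex (t.1.2.1, t.1.2.2)), t.2.1)

-- pvTupleLt is exactly the strict order of pvKeyD
theorem pv_tuple_lt_eq : pvTupleLt = fun a b => decide (pvKeyD a < pvKeyD b) := by
  funext a b
  simp only [pvTupleLt, pvKeyD, Prod.Lex.toLex_lt_toLex, toLex_inj, Prod.mk.injEq]
  rcases lt_trichotomy a.1.1 b.1.1 with h1 | h1 | h1
  · simp [h1]
  · rcases lt_trichotomy a.1.2.1 b.1.2.1 with h2 | h2 | h2
    · simp [h1, h2]
    · rcases lt_trichotomy a.1.2.2 b.1.2.2 with h3 | h3 | h3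
      · simp [h1, h2, h3]
      · simp [h1, h2, h3]
      · simp [h1, h2, not_lt_of_gt h3, h3.ne']
    · simp [h1, not_lt_of_gt h2, h2.ne']
  · simp [not_lt_of_gt h1, h1.ne']

-- B's decorated.sort() is PySem.List.sorted with that key
theorem pv_altsort_eq (l : List ((Int × Int × String) × Int × Option String × String)) :
    l.foldl (fun acc t => PySem.List.insertBy pvTupleLt t acc) []
      = PySem.List.sorted l pvKeyD false := by
  rw [PySem.List.sorted_eq_foldl_insertBy, pv_tuple_lt_eq]

-- the three-way append fold is three filters (one induction, for A's partitioning loop)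
theorem pv_partition3 {α β : Type} (g : α → β) (p1 p2 : α → Bool) (xs : List α)
    (a b c : List β) :
    xs.foldl (fun (acc : List β × List β × List β) x =>
        if p1 x then (acc.1 ++ [g x], acc.2.1, acc.2.2)
        else if p2 x then (acc.1, acc.2.1 ++ [g x], acc.2.2)
        else (acc.1, acc.2.1, acc.2.2 ++ [g x])) (a, b, c)
      = (a ++ (xs.filter p1).map g,
         b ++ (xs.filter (fun x => !p1 x && p2 x)).map g,
         c ++ (xs.filter (fun x => !p1 x && !p2 x)).map g) := by
  induction xs generalizing a b c with
  | nil => simp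
  | cons x xs ih =>
    by_cases h1 : p1 x
    · simp [h1, ih]
    · by_cases h2 : p2 x <;> simp [h1, h2, ih]

-- inserting an element that goes before everything
theorem pv_insertBy_front {α : Type} (b : α → α → Bool) (x : α) (m : List α)
    (h : ∀ z ∈ m, b x z = true) :
    PySem.List.insertBy b x m = x :: m := by
  cases m with
  | nil => rfl
  | cons y ys => simp [PySem.List.insertBy, h y (by simp)]

-- filter commutes with stable insertion into a key-sorted list
theorem pv_filter_insertBy {α κ : Type} [LinearOrder κ] (key : α → κ) (p : α → Bool)
    (x : α) (l : List α) (hl : l.Pairwise (fun a b => key a ≤ key b)) :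
    (PySem.List.insertBy (fun a b => decide (key a < key b)) x l).filter p
      = if p x then PySem.List.insertBy (fun a b => decide (key a < key b)) x (l.filter p)
        else l.filter p := by
  induction l with
  | nil =>
    by_cases hpx : p x <;> simp [PySem.List.insertBy, hpx]
  | cons y ys ih =>
    rcases List.pairwise_cons.mp hl with ⟨hy, hys⟩
    by_cases hxy : key x < key y
    · have hfront : PySem.List.insertBy (fun a b => decide (key a < key b)) x ((y :: ys).filter p)
          = x :: (y :: ys).filter p := by
        apply pv_insertBy_front
        intro z hz
        have hz' : z ∈ y :: ys := List.mem_of_mem_filter hz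
        rcases List.mem_cons.mp hz' with h | h
        · subst h; simpa using hxy
        · exact decide_eq_true (lt_of_lt_of_le hxy (hy z h))
      have hx2 : PySem.List.insertBy (fun a b => decide (key a < key b)) x (y :: ys)
          = x :: y :: ys := by simp [PySem.List.insertBy, hxy]
      rw [hx2, hfront]
      by_cases hpx : p x <;> simp [List.filter_cons, hpx]
    · have hstep : PySem.List.insertBy (fun a b => decide (key a < key b)) x (y :: ys)
          = y :: PySem.List.insertBy (fun a b => decide (key a < key b)) x ys := by
        simp [PySem.List.insertBy, hxy]
      by_cases hpy : p y
      · by_cases hpx : p x <;>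
          simp [hpy, ih hys, hpx, PySem.List.insertBy, hxy]
      · by_cases hpx : p x <;>
          simp [hstep, hpy, ih hys, hpx]

-- a stable sort commutes with filter
theorem pv_sorted_filter {α κ : Type} [LinearOrder κ] (key : α → κ) (p : α → Bool)
    (xs : List α) :
    (PySem.List.sorted xs key false).filter p = PySem.List.sorted (xs.filter p) key false := by
  induction xs using List.reverseRecOn with
  | nil => rfl
  | append_singleton xs x ih =>
    have hsort : ∀ (l : List α), PySem.List.sorted (l ++ [x]) key false
        = PySem.List.insertBy (fun a b => decide (key a < key b)) x (PySem.List.sorted l key false) := by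
      intro l
      simp [PySem.List.sorted, List.foldl_append]
    rw [hsort, pv_filter_insertBy key p x _ (PySem.List.sorted_pairwise xs key), ih]
    by_cases hpx : p x
    · rw [List.filter_append]
      simp [hpx, hsort]
    · rw [List.filter_append]
      simp [hpx]

-- insertion commutes with map when the key is read through the map
theorem pv_insertBy_map {α β κ : Type} [LT κ] [DecidableLT κ] (f : α → β) (key : β → κ)
    (x : α) (m : List α) :
    PySem.List.insertBy (fun a b => decide (key a < key b)) (f x) (m.map f)
      = (PySem.List.insertBy (fun a b => decide (key (f a) < key (f b))) x m).map f := by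
  induction m with
  | nil => rfl
  | cons y ys ih =>
    by_cases h : key (f x) < key (f y) <;> simp [PySem.List.insertBy, h, ih]

-- a stable sort commutes with map when the key is read through the map
theorem pv_sorted_map {α β κ : Type} [LT κ] [DecidableLT κ] (f : α → β) (key : β → κ)
    (xs : List α) :
    PySem.List.sorted (xs.map f) key false
      = (PySem.List.sorted xs (fun a => key (f a)) false).map f := by
  rw [PySem.List.sorted_eq_foldl_insertBy, PySem.List.sorted_eq_foldl_insertBy]
  suffices h : ∀ (l : List α) (acc : List α),
      (l.map f).foldl (fun acc x => PySem.List.insertBy (fun a b => decide (key a < key b)) x acc) (acc.map f)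
        = (l.foldl (fun acc x => PySem.List.insertBy (fun a b => decide (key (f a) < key (f b))) x acc) acc).map f by
    simpa using h xs []
  intro l
  induction l with
  | nil => simp
  | cons x xs ih =>
    intro acc
    simp only [List.map_cons, List.foldl_cons]
    rw [pv_insertBy_map f key x acc, ih]

-- inserting an element whose index exceeds every index present: the lex (key, idx)
-- comparison degenerates to the key comparison
theorem pv_insertBy_idx {α κ : Type} [LinearOrder κ] (key : α → κ)
    (x : Int × α) (m : List (Int × α)) (h : ∀ z ∈ m, z.1 < x.1) :
    PySem.List.insertBy (fun a b => decide (toLex (key a.2, a.1) < toLex (key b.2, b.1))) x m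
      = PySem.List.insertBy (fun a b => decide (key a.2 < key b.2)) x m := by
  induction m with
  | nil => rfl
  | cons y ys ih =>
    have hgy : y.1 < x.1 := h y (by simp)
    have hiff : (toLex (key x.2, x.1) < toLex (key y.2, y.1)) ↔ key x.2 < key y.2 := by
      rw [Prod.Lex.toLex_lt_toLex]
      constructor
      · rintro (h1 | ⟨h1, h2⟩)
        · exact h1
        · omega
      · exact fun h1 => Or.inl h1
    by_cases hk : key x.2 < key y.2
    · simp [PySem.List.insertBy, hiff.mpr hk, hk]
    · have hnot : ¬ (toLex (key x.2, x.1) < toLex (key y.2, y.1)) := fun hc => hk (hiff.mp hc)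
      simp [PySem.List.insertBy, hnot, hk, ih (fun z hz => h z (by simp [hz]))]

-- on a list with strictly increasing indices (enumerate), sorting by lex (key of the
-- element, index) is the stable sort by the key alone
theorem pv_sorted_idx {α κ : Type} [LinearOrder κ] (key : α → κ)
    (xs : List (Int × α)) (hx : xs.Pairwise (fun p q => p.1 < q.1)) :
    PySem.List.sorted xs (fun t => toLex (key t.2, t.1)) false
      = PySem.List.sorted xs (fun t => key t.2) false := by
  have h : ∀ (l : List (Int × α)) (acc : List (Int × α)), l.Pairwise (fun p q => p.1 < q.1) →
      (∀ x ∈ l, ∀ z ∈ acc, z.1 < x.1) →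
      l.foldl (fun acc x => PySem.List.insertBy
          (fun a b => decide (toLex (key a.2, a.1) < toLex (key b.2, b.1))) x acc) acc
        = l.foldl (fun acc x => PySem.List.insertBy
          (fun a b => decide (key a.2 < key b.2)) x acc) acc := by
    intro l
    induction l with
    | nil => intro acc _ _; rfl
    | cons x xs ih =>
      intro acc hp hacc
      rcases List.pairwise_cons.mp hp with ⟨hx1, hxs⟩
      simp only [List.foldl_cons]
      rw [pv_insertBy_idx key x acc (hacc x (by simp))]
      apply ih _ hxs
      intro y hy z hz
      rcases (PySem.List.mem_insertBy _ _ _ _).mp hz with hc | hc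
      · subst hc; exact hx1 y hy
      · exact hacc y (by simp [hy]) z hc
  rw [PySem.List.sorted_eq_foldl_insertBy, PySem.List.sorted_eq_foldl_insertBy]
  exact h xs [] hx (by simp)

-- one bucket of B, pushed back to A's filter-then-sort form: filter through the
-- sorted enumerate, then drop the indices
theorem pv_bucket (candidates : List (List (String × String)))
    (q : List (String × String) → Bool) :
    ((PySem.List.sorted (PySem.List.enumerate candidates) (fun p => pvKeyLex p.2) false).filter
        (fun p => q p.2)).map (fun p => pvCid p.2)
      = (PySem.List.sorted (candidates.filter q) pvKeyLex false).map pvCid := by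
  rw [pv_sorted_filter (fun p => pvKeyLex p.2) (fun p => q p.2) (PySem.List.enumerate candidates)]
  have h1 : candidates.filter q
      = ((PySem.List.enumerate candidates).filter (fun p => q p.2)).map (fun p => p.2) := by
    conv_lhs => rw [← PySem.List.map_snd_enumerate candidates 0]
    rw [List.filter_map]
    rfl
  rw [h1, pv_sorted_map (fun (p : Int × List (String × String)) => p.2) pvKeyLex
        ((PySem.List.enumerate candidates).filter (fun p => q p.2)), List.map_map]
  rfl

-- pv_bucket at the hold bucket's compound predicate, stated literally so the
-- rewrite in the verdict matches syntactically
theorem pv_bucket_hold (candidates : List (List (String × String))) :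
    ((PySem.List.sorted (PySem.List.enumerate candidates) (fun p => pvKeyLex p.2) false).filter
        (fun p => !pvIsRuntime p.2 && !pvIsWindbg p.2)).map (fun p => pvCid p.2)
      = (PySem.List.sorted (candidates.filter (fun x => !pvIsRuntime x && !pvIsWindbg x)) pvKeyLex false).map pvCid :=
  pv_bucket candidates (fun c => !pvIsRuntime c && !pvIsWindbg c)

-- ===== VERDICT (by name: the statement is the Claim_ definition above) =====
theorem build_priority_queue_spec : Claim_equal_build_priority_queue := by
  intro candidates _ _
  unfold Spec_build_priority_queue
  simp only [build_priority_queue, build_priority_queue_alt, pv_sorted_eq]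
  rw [pv_partition3 (fun c => c) pvIsRuntime pvIsWindbg candidates [] [] []]
  simp only [List.nil_append, List.map_id_fun', id]
  -- B's sort of the decorated list = (sorted enumerate by key of snd).map pvDecorate
  rw [pv_altsort_eq, pv_sorted_map (fun (p : Int × List (String × String)) => pvDecorate p.1 p.2)
        pvKeyD (PySem.List.enumerate candidates)]
  have hkey : (fun (p : Int × List (String × String)) => pvKeyD (pvDecorate p.1 p.2))
      = fun p => toLex ((pvKeyLex p.2, p.1)) := by
    funext p
    simp [pvKeyD, pvDecorate, pvKeyLex, pvK1, pvK2]
  rw [hkey, pv_sorted_idx pvKeyLex (PySem.List.enumerate candidates)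
        (PySem.List.pairwise_lt_enumerate candidates 0)]
  -- push each undecorating filter/map through the map pvDecorate
  rw [List.filter_map, List.filter_map, List.filter_map,
      List.map_map, List.map_map, List.map_map]
  have hr : ((fun (t : (Int × Int × String) × Int × Option String × String) => t.2.2.1 == some "runtime") ∘
        fun (p : Int × List (String × String)) => pvDecorate p.1 p.2)
      = fun p => pvIsRuntime p.2 := by
    funext p; simp [pvDecorate, pvIsRuntime]
  have hw : ((fun (t : (Int × Int × String) × Int × Option String × String) => t.2.2.1 == some "windbg") ∘
        fun (p : Int × List (String × String)) => pvDecorate p.1 p.2)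
      = fun p => pvIsWindbg p.2 := by
    funext p; simp [pvDecorate, pvIsWindbg]
  have hh : ((fun (t : (Int × Int × String) × Int × Option String × String) =>
        !(t.2.2.1 == some "runtime") && !(t.2.2.1 == some "windbg")) ∘
        fun (p : Int × List (String × String)) => pvDecorate p.1 p.2)
      = fun p => !pvIsRuntime p.2 && !pvIsWindbg p.2 := by
    funext p; simp [pvDecorate, pvIsRuntime, pvIsWindbg]
  have hproj : ((fun (t : (Int × Int × String) × Int × Option String × String) => t.2.2.2) ∘
        fun (p : Int × List (String × String)) => pvDecorate p.1 p.2)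
      = fun p => pvCid p.2 := by
    funext p; simp [pvDecorate]
  rw [hr, hw, hh, hproj]
  simp only [pv_bucket, pv_bucket_hold]
  -- the windbg bucket: A filters with !runtime && windbg, B with windbg alone; the
  -- two filters agree because the two tags are mutually exclusive
  have hfw : candidates.filter (fun x => !pvIsRuntime x && pvIsWindbg x)
      = candidates.filter pvIsWindbg := by
    apply List.filter_congr
    intro c _
    by_cases h1 : pvIsRuntime c
    · have : ¬ pvIsWindbg c = true := by
        simp only [pvIsRuntime] at h1
        simp [pvIsWindbg, beq_iff_eq] at h1 ⊢
        simp [h1]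
      simp [h1, Bool.not_eq_true] at this ⊢
      simp [this]
    · simp [h1]
  rw [hfw]
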